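-- pv_equiv track=rewrite | github.com/gverardo87-lab/fit-manager-ai | api/routers/movements.py | _prev_months
-- ===== SOURCE A (Python) =====
-- def _prev_months(anno: int, mese: int, count: int) -> list[tuple[int, int]]:
--     """Restituisce i precedenti N mesi come lista (anno, mese)."""
--     result = []
--     for _ in range(count):
--         mese -= 1
--         if mese < 1:
--             mese = 12
--             anno -= 1
--         result.append((anno, mese))
--     return result
-- ===== SOURCE B (Python) =====
-- def _prev_months(anno: int, mese: int, count: int) -> list[tuple[int, int]]:
--     """Restituisce i precedenti N mesi come lista (anno, mese)."""
--     base = anno * 12 + (mese - 1)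
--     return [((base - i) // 12, (base - i) % 12 + 1) for i in range(1, count + 1)]
-- ===== Notes on version B (the rewrite author's own statement) =====
-- stated objective: simpler
-- what changed: Replaces the stateful decrement-and-borrow loop with a closed-form absolute month index: each entry is divmod(base - i, 12), no mutable anno/mese threaded across iterations.
-- outside the precondition, e.g. on _prev_months(2024, 0, 1): A returns [(2023, 12)], B returns [(2023, 11)]; on _prev_months(2024, 14, 1): A returns [(2024, 13)], B returns [(2025, 1)]
import Mathlib
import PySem

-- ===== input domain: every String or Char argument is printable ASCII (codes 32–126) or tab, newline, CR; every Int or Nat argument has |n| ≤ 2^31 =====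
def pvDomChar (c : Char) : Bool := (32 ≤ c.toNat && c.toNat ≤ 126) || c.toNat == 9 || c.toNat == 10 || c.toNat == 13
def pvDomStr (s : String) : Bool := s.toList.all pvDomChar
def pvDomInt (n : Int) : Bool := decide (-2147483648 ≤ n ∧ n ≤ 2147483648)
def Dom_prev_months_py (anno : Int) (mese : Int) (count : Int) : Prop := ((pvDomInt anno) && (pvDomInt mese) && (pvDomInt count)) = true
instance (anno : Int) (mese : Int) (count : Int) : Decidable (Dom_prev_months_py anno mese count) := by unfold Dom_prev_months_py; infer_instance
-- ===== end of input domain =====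

-- B replaces A's stateful decrement-and-borrow month loop with a closed-form divmod on an
-- absolute month index (objective: simpler); equality is proved for mese in 1..13 or count ≤ 0.


-- ===== PORT A =====
def prev_months_py (anno : Int) (mese : Int) (count : Int) : List (Int × Int) :=
  -- result = []; for _ in range(count): mese -= 1; if mese < 1: mese = 12; anno -= 1; result.append((anno, mese))
  let st := (PySem.List.pyRange 0 count 1).foldl
    (fun (st : Int × Int × List (Int × Int)) _ =>
      let anno := st.1
      let mese := st.2.1
      let result := st.2.2
      let mese := mese - 1
      let p := if mese < 1 then (anno - 1, (12 : Int)) else (anno, mese)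
      (p.1, p.2, result ++ [(p.1, p.2)]))
    (anno, mese, ([] : List (Int × Int)))
  st.2.2

-- ===== PORT B =====
def prev_months_py_alt (anno : Int) (mese : Int) (count : Int) : List (Int × Int) :=
  let base := anno * 12 + (mese - 1)
  (PySem.List.pyRange 1 (count + 1) 1).map
    (fun i => (PySem.Int.floordiv (base - i) 12, PySem.Int.mod (base - i) 12 + 1))

-- ===== PRECONDITION & SPEC =====
-- Pre_ excludes only mese outside 1..13 combined with count ≥ 1: there A's unvalidated
-- decrement-and-borrow emits non-calendar months (e.g. month 13 stays in the output), an
-- accident of its implementation outside the natural calendar domain.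
def Pre_prev_months_py (anno : Int) (mese : Int) (count : Int) : Prop := (1 ≤ mese ∧ mese ≤ 13) ∨ count ≤ 0
instance (anno : Int) (mese : Int) (count : Int) : Decidable (Pre_prev_months_py anno mese count) := by unfold Pre_prev_months_py; infer_instance
def pvWitness_prev_months_py : Int × Int × Int := (2024, 1, 3)

def Spec_prev_months_py (anno : Int) (mese : Int) (count : Int) (out : List (Int × Int)) : Prop := out = prev_months_py_alt anno mese count
instance (anno : Int) (mese : Int) (count : Int) (out : List (Int × Int)) : Decidable (Spec_prev_months_py anno mese count out) := by unfold Spec_prev_months_py; infer_instance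

-- ===== CLAIM (what is proved, stated in full; the proofs are below) =====
def Claim_equal_prev_months_py : Prop := ∀ (anno : Int) (mese : Int) (count : Int), Dom_prev_months_py anno mese count → Pre_prev_months_py anno mese count → Spec_prev_months_py anno mese count (prev_months_py anno mese count)

-- ===== LEMMAS AND PROOFS =====

-- the per-step output of B's closed form
def pvMonth (t : Int) : Int × Int := (PySem.Int.floordiv t 12, PySem.Int.mod t 12 + 1)

lemma pvMonth_eq (a m : Int) (h1 : 1 ≤ m) (h2 : m ≤ 12) : pvMonth (a * 12 + (m - 1)) = (a, m) := by
  unfold pvMonth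
  rw [PySem.Int.floordiv_eq_ediv_of_pos (by omega), PySem.Int.mod_eq_emod_of_pos (by omega)]
  have hq : (a * 12 + (m - 1)) / 12 = a := by omega
  have hr : (a * 12 + (m - 1)) % 12 = m - 1 := by omega
  rw [hq, hr]
  simp

lemma loop_eq (l : List Int) : ∀ (a m : Int) (acc : List (Int × Int)), 1 ≤ m → m ≤ 13 →
    (l.foldl (fun (st : Int × Int × List (Int × Int)) _ =>
      let anno := st.1
      let mese := st.2.1
      let result := st.2.2
      let mese := mese - 1
      let p := if mese < 1 then (anno - 1, (12 : Int)) else (anno, mese)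
      (p.1, p.2, result ++ [(p.1, p.2)])) (a, m, acc)).2.2
    = acc ++ (List.range l.length).map (fun (k : Nat) => pvMonth (a * 12 + (m - 1) - ((k : Int) + 1))) := by
  induction l with
  | nil => intro a m acc _ _; simp
  | cons x xs ih =>
    intro a m acc h1 h2
    by_cases hm : m - 1 < 1
    · simp only [List.foldl_cons, hm, if_pos]
      rw [ih (a - 1) 12 (acc ++ [(a - 1, 12)]) (by omega) (by omega)]
      rw [List.length_cons, List.range_succ_eq_map, List.map_cons, List.map_map,
          List.append_assoc, List.singleton_append]
      rw [show a * 12 + (m - 1) - (((0:Nat):Int) + 1) = (a - 1) * 12 + (12 - 1) by push_cast; omega,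
          pvMonth_eq (a - 1) 12 (by omega) (by omega)]
      refine congrArg (acc ++ ·) (congrArg (List.cons _) (List.map_congr_left ?_))
      intro k _
      simp only [Function.comp]
      congr 1
      push_cast
      omega
    · simp only [List.foldl_cons, hm, if_false]
      rw [ih a (m - 1) (acc ++ [(a, m - 1)]) (by omega) (by omega)]
      rw [List.length_cons, List.range_succ_eq_map, List.map_cons, List.map_map,
          List.append_assoc, List.singleton_append]
      rw [show a * 12 + (m - 1) - (((0:Nat):Int) + 1) = a * 12 + (m - 1 - 1) by push_cast; omega,
          pvMonth_eq a (m - 1) (by omega) (by omega)]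
      refine congrArg (acc ++ ·) (congrArg (List.cons _) (List.map_congr_left ?_))
      intro k _
      simp only [Function.comp]
      congr 1
      push_cast
      omega

-- ===== VERDICT (by name: the statement is the Claim_ definition above) =====
theorem prev_months_py_spec : Claim_equal_prev_months_py := by
  intro anno mese count _ hpre
  unfold Spec_prev_months_py prev_months_py prev_months_py_alt
  by_cases hm : 1 ≤ mese ∧ mese ≤ 13
  case neg =>
    have hc : count ≤ 0 := hpre.resolve_left hm
    rw [PySem.List.pyRange_one_eq_nil (by omega : count ≤ 0),
        PySem.List.pyRange_one_eq_nil (by omega : count + 1 ≤ 1)]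
    simp
  rw [loop_eq _ anno mese [] hm.1 hm.2]
  rw [PySem.List.length_pyRange_one, PySem.List.pyRange_one, List.map_map]
  simp only [List.nil_append, Int.sub_zero, show count + 1 - 1 = count from by ring]
  apply List.map_congr_left
  intro k _
  simp only [Function.comp, pvMonth]
  congr 2 <;> ring_nf
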